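-- pv_equiv track=rewrite | github.com/simsang1l/Programmers | python/level1/대충_만든_자판.py | solution
-- ===== SOURCE A (Python) =====
-- def solution(keymap, targets):
--     answer = []
--     key = {}
--     for i in keymap :
--         for idx, j in enumerate(i):
--             if j not in key :
--                 key[j] = [idx + 1]
--             else :
--                 key[j].append(idx + 1)
--
--     for i in targets :
--         score = 0
--         for j in i :
--             if j in key:
--                 score += min(key[j])
--             elif j not in key :
--                 answer.append(-1)
--                 break
--         else :
--             answer.append(score)
--
--     return answer
-- ===== SOURCE B (Python) =====
-- def solution(keymap, targets):
--     # No precomputed dict: for each target char, scan the keymap directly.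
--     answer = []
--     for t in targets:
--         score = 0
--         for ch in t:
--             costs = [s.index(ch) + 1 for s in keymap if ch in s]
--             if not costs:
--                 answer.append(-1)
--                 break
--             score += min(costs)
--         else:
--             answer.append(score)
--     return answer
-- ===== Notes on version B (the rewrite author's own statement) =====
-- stated objective: simpler
-- what changed: B drops A's precomputed char->positions dict entirely and, for each target character, scans the keymap directly, taking min(s.index(ch)+1 over keymap strings containing ch).
import Mathlib
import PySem

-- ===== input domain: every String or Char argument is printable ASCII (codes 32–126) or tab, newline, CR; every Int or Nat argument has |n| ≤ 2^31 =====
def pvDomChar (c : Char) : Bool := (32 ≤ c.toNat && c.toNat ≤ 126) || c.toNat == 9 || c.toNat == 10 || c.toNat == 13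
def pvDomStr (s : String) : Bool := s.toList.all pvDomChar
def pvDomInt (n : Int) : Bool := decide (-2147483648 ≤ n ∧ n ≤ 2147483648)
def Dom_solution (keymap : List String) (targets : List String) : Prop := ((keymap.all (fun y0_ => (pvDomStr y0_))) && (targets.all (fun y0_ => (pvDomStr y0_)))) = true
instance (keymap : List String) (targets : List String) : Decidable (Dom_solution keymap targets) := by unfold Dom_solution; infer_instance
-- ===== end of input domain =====

-- B replaces A's precomputed char->positions dict by a direct per-character scan of the keymap (simpler; no speed claim).

-- ===== PORT A =====
-- A's first loop: build dict key : char -> list of (position+1) over all keymap strings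
def pvBuildKey (keymap : List String) : PySem.Dict Char (List Int) :=
  keymap.foldl (fun key i =>
    (PySem.List.enumerate i.toList 0).foldl (fun key p =>
      if key.contains p.2 = false then key.insert p.2 [p.1 + 1]
      else key.modify p.2 [] (fun l => l ++ [p.1 + 1])) key) PySem.Dict.empty

-- A's inner 'for j in i' loop with break/else: none = broke (append -1), some s = fell through
def pvTypeA (key : PySem.Dict Char (List Int)) : List Char → Int → Option Int
  | [], score => some score
  | j :: rest, score =>
    if key.contains j then
      pvTypeA key rest (score + (PySem.List.min? (key.getD j []) (fun x => x)).getD 0)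
    else none

def solution (keymap : List String) (targets : List String) : List Int :=
  let key := pvBuildKey keymap
  targets.foldl (fun answer i =>
    match pvTypeA key i.toList 0 with
    | some score => answer ++ [score]
    | none => answer ++ [-1]) []

-- ===== PORT B =====
-- B's comprehension: [s.index(ch) + 1 for s in keymap if ch in s]
def pvCosts (keymap : List String) (ch : Char) : List Int :=
  (keymap.filter (fun s => s.toList.contains ch)).map
    (fun s => ((PySem.List.index? s.toList ch).getD 0 : Int) + 1)

def pvTypeB (keymap : List String) : List Char → Int → Option Int
  | [], score => some score
  | ch :: rest, score =>
    match PySem.List.min? (pvCosts keymap ch) (fun x => x) with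
    | none => none
    | some m => pvTypeB keymap rest (score + m)

def solution_alt (keymap : List String) (targets : List String) : List Int :=
  targets.foldl (fun answer t =>
    match pvTypeB keymap t.toList 0 with
    | some score => answer ++ [score]
    | none => answer ++ [-1]) []

-- ===== PRECONDITION & SPEC =====
def Spec_solution (keymap : List String) (targets : List String) (out : List Int) : Prop := out = solution_alt keymap targets
instance (keymap : List String) (targets : List String) (out : List Int) : Decidable (Spec_solution keymap targets out) := by unfold Spec_solution; infer_instance

-- ===== CLAIM (what is proved, stated in full; the proofs are below) =====
def Claim_equal_solution : Prop := ∀ (keymap : List String) (targets : List String), Dom_solution keymap targets → Spec_solution keymap targets (solution keymap targets)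

-- ===== LEMMAS AND PROOFS =====

-- positions+1 of j in s, indices starting at n (what A's dict stores for one string)
def pvOcc (n : Int) (s : List Char) (j : Char) : List Int :=
  ((PySem.List.enumerate s n).filter (fun p => p.2 == j)).map (fun p => p.1 + 1)

theorem pvOcc_nil (n : Int) (j : Char) : pvOcc n [] j = [] := rfl

theorem pvOcc_cons (n : Int) (c : Char) (s : List Char) (j : Char) :
    pvOcc n (c :: s) j = if c = j then (n + 1) :: pvOcc (n + 1) s j else pvOcc (n + 1) s j := by
  simp [pvOcc, PySem.List.enumerate_cons]
  by_cases h : c = j <;> simp [h]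

theorem pvOcc_eq_nil_iff (n : Int) (s : List Char) (j : Char) :
    pvOcc n s j = [] ↔ j ∉ s := by
  induction s generalizing n with
  | nil => simp [pvOcc_nil]
  | cons c s ih =>
    rw [pvOcc_cons]
    by_cases h : c = j
    · subst h; simp
    · rw [if_neg h, ih]
      simp only [List.mem_cons, not_or]
      constructor
      · intro hns; exact ⟨fun hh => h hh.symm, hns⟩
      · intro hp; exact hp.2

def pvCost (s : List Char) (j : Char) : Int := ((PySem.List.index? s j).getD 0 : Int) + 1

theorem pvCost_min (n : Int) (s : List Char) (j : Char) (hj : j ∈ s) :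
    (n + pvCost s j) ∈ pvOcc n s j ∧ ∀ x ∈ pvOcc n s j, n + pvCost s j ≤ x := by
  induction s generalizing n with
  | nil => simp at hj
  | cons c s ih =>
    rw [pvOcc_cons]
    by_cases h : c = j
    · subst h
      have hcost : pvCost (c :: s) c = 1 := by
        have h0 : PySem.List.index? (c :: s) c = some 0 := PySem.List.index?_cons_self c s
        unfold pvCost
        rw [h0]
        simp
      have hmem : ∀ x ∈ pvOcc (n + 1) s c, n + 1 ≤ x := by
        intro x hx
        by_cases hcs : c ∈ s
        · have h1 := (ih (n := n + 1) hcs).2 x hx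
          have h2 : (0:Int) ≤ ((PySem.List.index? s c).getD 0 : Int) := by positivity
          simp only [pvCost] at h1
          omega
        · rw [(pvOcc_eq_nil_iff _ _ _).2 hcs] at hx; simp at hx
      rw [if_pos rfl, hcost]
      refine ⟨List.mem_cons_self, ?_⟩
      intro x hx
      rcases List.mem_cons.1 hx with h1 | h1
      · omega
      · exact hmem x h1
    · have hjs : j ∈ s := by
        rcases List.mem_cons.1 hj with h1 | h1
        · exact absurd h1 (fun hh => h hh.symm)
        · exact h1
      have ih' := ih (n := n + 1) hjs
      obtain ⟨k, hk⟩ := Option.isSome_iff_exists.1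
        ((PySem.List.index?_isSome_iff (xs := s) (v := j)).2 hjs)
      have hidx : PySem.List.index? (c :: s) j = (PySem.List.index? s j).map (· + 1) :=
        PySem.List.index?_cons_of_ne (x := c) (v := j) (xs := s) h
      have hcost : pvCost (c :: s) j = pvCost s j + 1 := by
        unfold pvCost
        rw [hidx, hk]
        simp
      rw [if_neg h, hcost]
      constructor
      · have heq : n + (pvCost s j + 1) = (n + 1) + pvCost s j := by ring
        rw [heq]
        exact ih'.1
      · intro x hx
        have := ih'.2 x hx
        omega

-- A's dict characterized: getD and key membership
theorem pvBuildKey_step (key : PySem.Dict Char (List Int)) (p : Int × Char) :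
    (if key.contains p.2 = false then key.insert p.2 [p.1 + 1]
     else key.modify p.2 [] (fun l => l ++ [p.1 + 1]))
      = key.modify p.2 [] (fun l => l ++ [p.1 + 1]) := by
  by_cases h : key.contains p.2
  · simp [h]
  · simp only [Bool.not_eq_true] at h
    simp [h, PySem.Dict.modify, PySem.Dict.getD_of_not_contains]

theorem pvBuildKey_getD (keymap : List String) (j : Char) :
    (pvBuildKey keymap).getD j [] = keymap.flatMap (fun i => pvOcc 0 i.toList j) := by
  unfold pvBuildKey
  suffices h : ∀ (km : List String) (d : PySem.Dict Char (List Int)),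
      (km.foldl (fun key i =>
        (PySem.List.enumerate i.toList 0).foldl (fun key p =>
          if key.contains p.2 = false then key.insert p.2 [p.1 + 1]
          else key.modify p.2 [] (fun l => l ++ [p.1 + 1])) key) d).getD j []
        = d.getD j [] ++ km.flatMap (fun i => pvOcc 0 i.toList j) by
    simpa using h keymap PySem.Dict.empty
  intro km
  induction km with
  | nil => simp
  | cons i km ih =>
    intro d
    rw [List.foldl_cons, ih]
    have hinner : ∀ (d : PySem.Dict Char (List Int)),
        ((PySem.List.enumerate i.toList 0).foldl (fun key p =>
          if key.contains p.2 = false then key.insert p.2 [p.1 + 1]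
          else key.modify p.2 [] (fun l => l ++ [p.1 + 1])) d).getD j []
          = d.getD j [] ++ pvOcc 0 i.toList j := by
      intro d
      have h1 : ((PySem.List.enumerate i.toList 0).foldl (fun key p =>
            if key.contains p.2 = false then key.insert p.2 [p.1 + 1]
            else key.modify p.2 [] (fun l => l ++ [p.1 + 1])) d)
          = (((PySem.List.enumerate i.toList 0).map (fun p => (p.2, p.1 + 1))).foldl
              (fun key q => key.modify q.1 [] (fun l => l ++ [q.2])) d) := by
        rw [List.foldl_map]
        apply PySem.List.foldl_congr_mem
        intro acc x _
        rw [pvBuildKey_step]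
      rw [h1, PySem.Dict.getD_foldl_modify_append]
      congr 1
      simp [pvOcc, List.filter_map, List.map_map, Function.comp_def]
    rw [hinner, List.flatMap_cons, List.append_assoc]

theorem pvBuildKey_keys (keymap : List String) :
    (pvBuildKey keymap).keys = PySem.Set.ofList (keymap.flatMap (fun s => s.toList)) := by
  unfold pvBuildKey
  suffices h : ∀ (km : List String) (d : PySem.Dict Char (List Int)),
      (km.foldl (fun key i =>
        (PySem.List.enumerate i.toList 0).foldl (fun key p =>
          if key.contains p.2 = false then key.insert p.2 [p.1 + 1]
          else key.modify p.2 [] (fun l => l ++ [p.1 + 1])) key) d).keys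
        = PySem.Set.update d.keys (km.flatMap (fun s => s.toList)) by
    rw [h keymap PySem.Dict.empty]
    rw [PySem.Set.update_eq_append_filter]
    simp [PySem.Dict.keys_empty]
  intro km
  induction km with
  | nil => intro d; simp [PySem.Set.update]
  | cons i km ih =>
    intro d
    rw [List.foldl_cons, ih]
    have h1 : ((PySem.List.enumerate i.toList 0).foldl (fun key p =>
          if key.contains p.2 = false then key.insert p.2 [p.1 + 1]
          else key.modify p.2 [] (fun l => l ++ [p.1 + 1])) d)
        = (((PySem.List.enumerate i.toList 0).map (fun p => (p.2, p.1 + 1))).foldl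
            (fun key q => key.modify q.1 [] (fun l => l ++ [q.2])) d) := by
      rw [List.foldl_map]
      apply PySem.List.foldl_congr_mem
      intro acc x _
      rw [pvBuildKey_step]
    rw [h1, PySem.Dict.keys_foldl_modify_key]
    have h4 : ((PySem.List.enumerate i.toList 0).map (fun p => (p.2, p.1 + 1))).map Prod.fst
        = i.toList := by
      simp [List.map_map, Function.comp_def, PySem.List.map_snd_enumerate]
    rw [h4, List.flatMap_cons]
    simp [PySem.Set.update, List.foldl_append]

theorem pvBuildKey_contains (keymap : List String) (j : Char) :
    (pvBuildKey keymap).contains j = true ↔ ∃ s ∈ keymap, j ∈ s.toList := by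
  rw [PySem.Dict.contains_iff_mem_keys, pvBuildKey_keys, PySem.Set.mem_ofList]
  simp

-- membership in what A's dict stores vs B's cost list
theorem mem_costs_iff (keymap : List String) (j : Char) (b : Int) :
    b ∈ pvCosts keymap j ↔ ∃ s ∈ keymap, j ∈ s.toList ∧ b = pvCost s.toList j := by
  simp only [pvCosts, List.mem_map, List.mem_filter]
  constructor
  · rintro ⟨s, ⟨hs, hc⟩, rfl⟩
    exact ⟨s, hs, by simpa using hc, rfl⟩
  · rintro ⟨s, hs, hj, rfl⟩
    exact ⟨s, ⟨hs, by simpa using hj⟩, rfl⟩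

-- the per-character agreement: A's min over all stored positions = B's min over first positions
theorem min_agree (keymap : List String) (j : Char) (hj : ∃ s ∈ keymap, j ∈ s.toList) :
    PySem.List.min? ((pvBuildKey keymap).getD j []) (fun x => x)
      = PySem.List.min? (pvCosts keymap j) (fun x => x) := by
  set L := (pvBuildKey keymap).getD j [] with hL
  have hLchar : ∀ x, x ∈ L ↔ ∃ s ∈ keymap, x ∈ pvOcc 0 s.toList j := by
    intro x; rw [hL, pvBuildKey_getD]; simp
  -- both lists are nonempty
  obtain ⟨s0, hs0, hjs0⟩ := hj
  have hLne : L ≠ [] := by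
    intro h
    have := (hLchar (0 + pvCost s0.toList j)).2 ⟨s0, hs0, (pvCost_min 0 s0.toList j hjs0).1⟩
    rw [h] at this; simp at this
  have hCne : pvCosts keymap j ≠ [] := by
    intro h
    have := (mem_costs_iff keymap j (pvCost s0.toList j)).2 ⟨s0, hs0, hjs0, rfl⟩
    rw [h] at this; simp at this
  obtain ⟨a, ha⟩ : ∃ a, PySem.List.min? L (fun x => x) = some a := by
    cases h : PySem.List.min? L (fun x => x) with
    | none => exact absurd ((PySem.List.min?_eq_none_iff _ _).1 h) hLne
    | some a => exact ⟨a, rfl⟩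
  obtain ⟨b, hb⟩ : ∃ b, PySem.List.min? (pvCosts keymap j) (fun x => x) = some b := by
    cases h : PySem.List.min? (pvCosts keymap j) (fun x => x) with
    | none => exact absurd ((PySem.List.min?_eq_none_iff _ _).1 h) hCne
    | some b => exact ⟨b, rfl⟩
  rw [ha, hb]
  have haMem := PySem.List.min?_mem ha
  have haMin := PySem.List.min?_isMin ha
  have hbMem := PySem.List.min?_mem hb
  have hbMin := PySem.List.min?_isMin hb
  congr 1
  -- a ≤ b: b is some string's first-position cost, which lies in L
  have hab : a ≤ b := by
    obtain ⟨s, hs, hjs, rfl⟩ := (mem_costs_iff keymap j b).1 hbMem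
    have : (0 + pvCost s.toList j) ∈ L := (hLchar _).2 ⟨s, hs, (pvCost_min 0 s.toList j hjs).1⟩
    have := haMin _ (by simpa using this)
    simpa using this
  -- b ≤ a: a lies in some pvOcc, bounded below by that string's cost, which is in pvCosts
  have hba : b ≤ a := by
    obtain ⟨s, hs, haOcc⟩ := (hLchar a).1 haMem
    have hjs : j ∈ s.toList := by
      by_contra h
      rw [(pvOcc_eq_nil_iff _ _ _).2 h] at haOcc; simp at haOcc
    have h1 : 0 + pvCost s.toList j ≤ a := (pvCost_min 0 s.toList j hjs).2 a haOcc
    have h2 : pvCost s.toList j ∈ pvCosts keymap j :=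
      (mem_costs_iff keymap j _).2 ⟨s, hs, hjs, rfl⟩
    have := hbMin _ h2
    simp at this h1; omega
  omega

theorem type_agree (keymap : List String) (cs : List Char) (score : Int) :
    pvTypeA (pvBuildKey keymap) cs score = pvTypeB keymap cs score := by
  induction cs generalizing score with
  | nil => rfl
  | cons j rest ih =>
    rw [pvTypeA, pvTypeB]
    by_cases h : ∃ s ∈ keymap, j ∈ s.toList
    · rw [if_pos ((pvBuildKey_contains keymap j).2 h), min_agree keymap j h]
      obtain ⟨b, hb⟩ : ∃ b, PySem.List.min? (pvCosts keymap j) (fun x => x) = some b := by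
        obtain ⟨s0, hs0, hjs0⟩ := h
        cases hm : PySem.List.min? (pvCosts keymap j) (fun x => x) with
        | none =>
          have := (PySem.List.min?_eq_none_iff _ _).1 hm
          have hmem := (mem_costs_iff keymap j (pvCost s0.toList j)).2 ⟨s0, hs0, hjs0, rfl⟩
          rw [this] at hmem; simp at hmem
        | some b => exact ⟨b, rfl⟩
      rw [hb]
      simp only [Option.getD_some]
      exact ih (score + b)
    · have hc : (pvBuildKey keymap).contains j = false := by
        rcases Bool.eq_false_or_eq_true ((pvBuildKey keymap).contains j) with h1 | h1
        · exact absurd ((pvBuildKey_contains keymap j).1 h1) h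
        · exact h1
      rw [if_neg (by simp [hc])]
      have hcosts : pvCosts keymap j = [] := by
        rcases h2 : pvCosts keymap j with _ | ⟨b, t⟩
        · rfl
        · have : b ∈ pvCosts keymap j := by rw [h2]; exact List.mem_cons_self
          obtain ⟨s, hs, hjs, _⟩ := (mem_costs_iff keymap j b).1 this
          exact absurd ⟨s, hs, hjs⟩ h
      rw [hcosts]
      rfl

theorem solution_spec : Claim_equal_solution := by
  intro keymap targets _
  unfold Spec_solution solution solution_alt
  apply PySem.List.foldl_congr_mem
  intro acc t _
  rw [type_agree]
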